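-- pv_equiv track=rewrite | github.com/JosefinHao/financial_advisor | debug_manual_parens.py | manual_double_parens_replace
-- ===== SOURCE A (Python) =====
-- def manual_double_parens_replace(s):
--     result = ''
--     i = 0
--     while i < len(s):
--         if s[i:i+2] == '((':  # Found ((
--             start = i + 2
--             end = s.find('))', start)
--             if end != -1:
--                 result += f'${s[start:end]}$'
--                 i = end + 2
--             else:
--                 result += s[i:]
--                 break
--         else:
--             result += s[i]
--             i += 1
--     return result
-- ===== SOURCE B (Python) =====
-- def manual_double_parens_replace(s):
--     # Split on '((' once, then stitch pieces back together, turning each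
--     # closed '((...))' span into '$...$'; an unclosed '((' is re-emitted verbatim.
--     pieces = s.split('((')
--     out = pieces[0]
--     buf = None  # content accumulated after a still-open '((' (no '))' seen yet)
--     for p in pieces[1:]:
--         cur = p if buf is None else buf + '((' + p
--         j = cur.find('))')
--         if j == -1:
--             buf = cur
--         else:
--             out += '$' + cur[:j] + '$' + cur[j + 2:]
--             buf = None
--     if buf is not None:
--         out += '((' + buf
--     return out
-- ===== Notes on version B (the rewrite author's own statement) =====
-- stated objective: faster
-- what changed: Replaced the character-by-character while-loop scanner (which appends to the result one character at a time) with a single split-on-'((' pass that stitches the pieces back together, closing each span at the first '))' and re-emitting an unclosed '((' verbatim.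
import Mathlib
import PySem

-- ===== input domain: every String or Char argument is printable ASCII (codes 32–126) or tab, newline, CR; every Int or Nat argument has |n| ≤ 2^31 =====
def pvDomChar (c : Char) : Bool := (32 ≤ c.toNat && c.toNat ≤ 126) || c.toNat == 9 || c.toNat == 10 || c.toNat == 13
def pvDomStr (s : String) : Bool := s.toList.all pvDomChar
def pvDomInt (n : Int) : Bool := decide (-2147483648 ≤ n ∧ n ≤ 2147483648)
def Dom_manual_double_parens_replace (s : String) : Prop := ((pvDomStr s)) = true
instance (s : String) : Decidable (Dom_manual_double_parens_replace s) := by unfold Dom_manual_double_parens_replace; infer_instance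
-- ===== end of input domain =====

-- B replaces A's character-by-character scanner with a split-on-'((' pass that stitches the
-- pieces back together (objective: alternative algorithm, same result).

-- ===== PORT A =====
-- s.find('))', start) relative to the current suffix: index of the first "))" (none = -1).
def findDD : List Char → Option Nat
  | a :: b :: t => if a = ')' ∧ b = ')' then some 0 else (findDD (b :: t)).map (· + 1)
  | _ => none

-- A's while-loop over (result, i), as structural recursion on the suffix s[i:]
-- (exact: A only reads s via s[i:i+2], s.find('))', i+2) and slices of the suffix).
def aLoop : List Char → List Char
  | [] => []
  | c :: cs =>
    if c = '(' ∧ cs.head? = some '(' then          -- s[i:i+2] == '(('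
      match findDD cs.tail with                     -- end = s.find('))', i+2)
      | some e => '$' :: cs.tail.take e ++ '$' :: aLoop (cs.tail.drop (e + 2))
      | none => c :: cs                             -- result += s[i:]; break
    else c :: aLoop cs                              -- result += s[i]
  termination_by l => l.length
  decreasing_by all_goals (simp; try omega)

def manual_double_parens_replace (s : String) : String :=
  String.ofList (aLoop s.toList)

-- ===== PORT B =====
-- s.split('((') ported by hand (exact: leftmost non-overlapping matches of the two-char separator).
def splitDD : List Char → List (List Char)
  | [] => [[]]
  | c :: cs =>
    if c = '(' ∧ cs.head? = some '(' then [] :: splitDD cs.tail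
    else
      match splitDD cs with
      | [] => [[c]]
      | h :: t => (c :: h) :: t
  termination_by l => l.length
  decreasing_by all_goals (simp; try omega)

-- B's for-loop over pieces[1:] with state (out, buf); out accumulation becomes the returned prefix.
def bLoop : List (List Char) → Option (List Char) → List Char
  | [], none => []
  | [], some b => '(' :: '(' :: b                       -- trailing unclosed '((' re-emitted
  | p :: ps, buf =>
    let cur := match buf with | none => p | some b => b ++ '(' :: '(' :: p
    match findDD cur with                                -- cur.find('))')
    | none => bLoop ps (some cur)
    | some j => '$' :: cur.take j ++ '$' :: (cur.drop (j + 2) ++ bLoop ps none)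

def manual_double_parens_replace_alt (s : String) : String :=
  String.ofList
    (match splitDD s.toList with
     | [] => []
     | p :: ps => p ++ bLoop ps none)

-- ===== PRECONDITION & SPEC =====
def Spec_manual_double_parens_replace (s : String) (out : String) : Prop := out = manual_double_parens_replace_alt s
instance (s : String) (out : String) : Decidable (Spec_manual_double_parens_replace s out) := by unfold Spec_manual_double_parens_replace; infer_instance

-- ===== CLAIM (what is proved, stated in full; the proofs are below) =====
def Claim_equal_manual_double_parens_replace : Prop := ∀ (s : String), Dom_manual_double_parens_replace s → Spec_manual_double_parens_replace s (manual_double_parens_replace s)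

-- ===== LEMMAS AND PROOFS =====

-- "contains no '((' substring"
def hasDD : List Char → Bool
  | a :: b :: t => (a = '(' && b = '(') || hasDD (b :: t)
  | _ => false

lemma hasDD_cons_false {c : Char} {cs : List Char} :
    hasDD (c :: cs) = false ↔ ¬(c = '(' ∧ cs.head? = some '(') ∧ hasDD cs = false := by
  cases cs <;> simp [hasDD]

lemma hasDD_append_right {l₁ l₂ : List Char} (h : hasDD (l₁ ++ l₂) = false) :
    hasDD l₂ = false := by
  induction l₁ with
  | nil => exact h
  | cons c l₁ ih => exact ih ((hasDD_cons_false.mp h).2)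

lemma hasDD_drop (k : Nat) {l : List Char} (h : hasDD l = false) :
    hasDD (l.drop k) = false := by
  have := List.take_append_drop k l
  exact hasDD_append_right (l₁ := l.take k) (by rw [this]; exact h)

lemma findDD_bound : ∀ {l : List Char} {j : Nat}, findDD l = some j → j + 2 ≤ l.length := by
  intro l
  induction l with
  | nil => intro j h; simp [findDD] at h
  | cons a t ih =>
    intro j h
    cases t with
    | nil => simp [findDD] at h
    | cons b t' =>
      simp only [findDD] at h
      split at h
      · simp only [List.length_cons]; simp at h; omega
      · cases hj : findDD (b :: t') with
        | none => simp [hj] at h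
        | some k =>
          simp [hj] at h
          have := ih hj
          simp [List.length_cons] at this ⊢
          omega

lemma findDD_paren (x : List Char) : findDD ('(' :: x) = (findDD x).map (· + 1) := by
  cases x with
  | nil => simp [findDD]
  | cons b t => simp [findDD]

lemma findDD_append_left : ∀ {p : List Char} {j : Nat} (x : List Char),
    findDD p = some j → findDD (p ++ x) = some j := by
  intro p
  induction p with
  | nil => intro j x h; simp [findDD] at h
  | cons a t ih =>
    intro j x h
    cases t with
    | nil => simp [findDD] at h
    | cons b t' =>
      simp only [List.cons_append]
      simp only [findDD] at h ⊢
      by_cases hc : a = ')' ∧ b = ')'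
      · rw [if_pos hc] at h ⊢; exact h
      · rw [if_neg hc] at h ⊢
        cases hj : findDD (b :: t') with
        | none => rw [hj] at h; simp at h
        | some k =>
          rw [hj] at h
          simp at h
          have h2 := ih (j := k) x hj
          simp only [List.cons_append] at h2
          rw [h2]
          simp [h]

lemma findDD_append_paren_none : ∀ {p : List Char} (x : List Char),
    findDD p = none → findDD (p ++ '(' :: x) = (findDD ('(' :: x)).map (· + p.length) := by
  intro p
  induction p with
  | nil => intro x _; cases h : findDD ('(' :: x) <;> simp [h]
  | cons a t ih =>
    intro x h
    cases t with
    | nil =>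
      show findDD (a :: '(' :: x) = _
      simp only [findDD]
      rw [if_neg (by simp)]
      cases hx : findDD ('(' :: x) <;> simp
    | cons b t' =>
      simp only [findDD] at h
      by_cases hc : a = ')' ∧ b = ')'
      · rw [if_pos hc] at h; simp at h
      · rw [if_neg hc] at h
        cases hj : findDD (b :: t') with
        | some k => rw [hj] at h; simp at h
        | none =>
          simp only [List.cons_append]
          simp only [findDD]
          rw [if_neg hc]
          have h2 := ih x hj
          simp only [List.cons_append] at h2
          rw [h2]
          cases hx : findDD ('(' :: x) <;> (simp; try omega)

lemma findDD_buf (b s : List Char) (hb : findDD b = none) :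
    findDD (b ++ '(' :: '(' :: s) = (findDD s).map (fun k => b.length + 2 + k) := by
  rw [findDD_append_paren_none _ hb, findDD_paren, findDD_paren]
  cases h : findDD s <;> (simp; try omega)

lemma aLoop_id : ∀ {l : List Char}, hasDD l = false → aLoop l = l := by
  intro l
  induction l with
  | nil => intro _; simp [aLoop]
  | cons c cs ih =>
    intro h
    obtain ⟨h1, h2⟩ := hasDD_cons_false.mp h
    rw [aLoop, if_neg h1, ih h2]

lemma aLoop_copy : ∀ {p : List Char} (q : List Char), hasDD (p ++ ['(']) = false →
    aLoop (p ++ '(' :: '(' :: q) = p ++ aLoop ('(' :: '(' :: q) := by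
  intro p
  induction p with
  | nil => intro q _; simp
  | cons c p' ih =>
    intro q h
    obtain ⟨h1, h2⟩ := hasDD_cons_false.mp (by simpa using h)
    have hhead : (p' ++ '(' :: '(' :: q).head? = (p' ++ ['(']).head? := by
      cases p' <;> simp
    rw [show (c :: p') ++ '(' :: '(' :: q = c :: (p' ++ '(' :: '(' :: q) by simp]
    rw [aLoop, if_neg (by rw [hhead]; exact h1), ih q h2]
    simp

-- splitDD decomposition: either no '((' at all, or s = p ++ '((' ++ q with p the first piece.
lemma splitDD_decompose : ∀ (s : List Char),
    (hasDD s = false ∧ splitDD s = [s]) ∨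
    (∃ p q, s = p ++ '(' :: '(' :: q ∧ hasDD (p ++ ['(']) = false ∧
      splitDD s = p :: splitDD q ∧ q.length < s.length) := by
  intro s
  induction s with
  | nil => left; exact ⟨rfl, by simp [splitDD]⟩
  | cons c cs ih =>
    by_cases hc : c = '(' ∧ cs.head? = some '('
    · right
      obtain ⟨hc1, hc2⟩ := hc
      cases cs with
      | nil => simp at hc2
      | cons d cs' =>
        simp only [List.head?_cons, Option.some.injEq] at hc2
        refine ⟨[], cs', by simp [hc1, hc2], by simp [hasDD], ?_, by simp⟩
        rw [splitDD, if_pos ⟨hc1, by simp [hc2]⟩]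
        rfl
    · rcases ih with ⟨hno, hsp⟩ | ⟨p, q, hs, hp, hsp, hlen⟩
      · left
        refine ⟨hasDD_cons_false.mpr ⟨hc, hno⟩, ?_⟩
        rw [splitDD, if_neg hc, hsp]
      · right
        refine ⟨c :: p, q, by simp [hs], ?_, ?_, by simp [hs]; omega⟩
        · refine hasDD_cons_false.mpr ⟨?_, hp⟩
          intro ⟨hc1, hh⟩
          apply hc
          refine ⟨hc1, ?_⟩
          rw [hs]
          cases p with
          | nil => simp
          | cons e p' => simp at hh; simp [hh]
        · rw [splitDD, if_neg hc, hsp]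

-- the text an open '((' plus buffer stands for
def unbufL : Option (List Char) → List Char → List Char
  | none, q => q
  | some b, q => b ++ '(' :: '(' :: q

lemma take_buf (b p : List Char) (j : Nat) :
    (b ++ '(' :: '(' :: p).take (b.length + 2 + j) = b ++ '(' :: '(' :: p.take j := by
  rw [show b ++ '(' :: '(' :: p = (b ++ ['(', '(']) ++ p by simp]
  rw [List.take_append]
  rw [List.take_of_length_le (by simp)]
  have : b.length + 2 + j - (b ++ ['(', '(']).length = j := by simp
  rw [this]
  simp

lemma drop_buf (b p : List Char) (j : Nat) :
    (b ++ '(' :: '(' :: p).drop (b.length + 2 + j) = p.drop j := by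
  rw [show b ++ '(' :: '(' :: p = (b ++ ['(', '(']) ++ p by simp]
  rw [List.drop_append]
  rw [List.drop_eq_nil_of_le (by simp)]
  have : b.length + 2 + j - (b ++ ['(', '(']).length = j := by simp
  rw [this]
  simp

lemma aLoop_open_some {t : List Char} {e : Nat} (h : findDD t = some e) :
    aLoop ('(' :: '(' :: t) = '$' :: t.take e ++ '$' :: aLoop (t.drop (e + 2)) := by
  rw [aLoop, if_pos (by simp)]
  simp only [List.tail_cons]
  rw [h]

lemma aLoop_open_none {t : List Char} (h : findDD t = none) :
    aLoop ('(' :: '(' :: t) = '(' :: '(' :: t := by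
  rw [aLoop, if_pos (by simp)]
  simp only [List.tail_cons]
  rw [h]

lemma bLoop_none_nf {p : List Char} {ps : List (List Char)} (h : findDD p = none) :
    bLoop (p :: ps) none = bLoop ps (some p) := by
  simp only [bLoop]
  rw [h]

lemma bLoop_none_f {p : List Char} {ps : List (List Char)} {j : Nat} (h : findDD p = some j) :
    bLoop (p :: ps) none = '$' :: p.take j ++ '$' :: (p.drop (j + 2) ++ bLoop ps none) := by
  simp only [bLoop]
  rw [h]

lemma bLoop_some_nf {b p : List Char} {ps : List (List Char)}
    (hb : findDD b = none) (h : findDD p = none) :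
    bLoop (p :: ps) (some b) = bLoop ps (some (b ++ '(' :: '(' :: p)) := by
  simp only [bLoop]
  rw [findDD_buf b p hb, h]
  rfl

lemma bLoop_some_f {b p : List Char} {ps : List (List Char)} {j : Nat}
    (hb : findDD b = none) (h : findDD p = some j) :
    bLoop (p :: ps) (some b) =
      '$' :: (b ++ '(' :: '(' :: p.take j) ++ '$' :: (p.drop (j + 2) ++ bLoop ps none) := by
  simp only [bLoop]
  rw [findDD_buf b p hb, h]
  simp only [Option.map_some]
  rw [take_buf, show b.length + 2 + j + 2 = b.length + 2 + (j + 2) by omega, drop_buf]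

-- Main invariant: folding B's remaining pieces with an open buffer computes exactly
-- what A's scanner computes from the matching '((' onwards.
lemma bLoop_eq_aLoop : ∀ (n : Nat) (s : List Char) (buf : Option (List Char)),
    s.length ≤ n → (∀ b, buf = some b → findDD b = none) →
    bLoop (splitDD s) buf = aLoop ('(' :: '(' :: unbufL buf s) := by
  intro n
  induction n using Nat.strong_induction_on with
  | _ n ih =>
    intro s buf hn hbuf
    rcases splitDD_decompose s with ⟨hno, hsp⟩ | ⟨p, q, hs, hp, hsp, hlen⟩
    · -- s is the only piece: no '((' inside s
      rw [hsp]
      cases buf with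
      | none =>
        show bLoop [s] none = aLoop ('(' :: '(' :: s)
        cases hf : findDD s with
        | none => rw [bLoop_none_nf hf, aLoop_open_none hf]; rfl
        | some j =>
          rw [bLoop_none_f hf, aLoop_open_some hf, aLoop_id (hasDD_drop (j + 2) hno)]
          simp [bLoop]
      | some b =>
        have hb := hbuf b rfl
        show bLoop [s] (some b) = aLoop ('(' :: '(' :: (b ++ '(' :: '(' :: s))
        cases hf : findDD s with
        | none =>
          have hD : findDD (b ++ '(' :: '(' :: s) = none := by
            rw [findDD_buf b s hb, hf]; rfl
          rw [bLoop_some_nf hb hf, aLoop_open_none hD]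
          rfl
        | some j =>
          have hD : findDD (b ++ '(' :: '(' :: s) = some (b.length + 2 + j) := by
            rw [findDD_buf b s hb, hf]; rfl
          rw [bLoop_some_f hb hf, aLoop_open_some hD, take_buf,
            show b.length + 2 + j + 2 = b.length + 2 + (j + 2) by omega, drop_buf,
            aLoop_id (hasDD_drop (j + 2) hno)]
          simp [bLoop]
    · -- s = p ++ '((' ++ q, first piece p
      subst hs
      rw [hsp]
      have hqn : q.length < n := lt_of_lt_of_le hlen hn
      cases buf with
      | none =>
        show bLoop (p :: splitDD q) none = aLoop ('(' :: '(' :: (p ++ '(' :: '(' :: q))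
        cases hf : findDD p with
        | none =>
          rw [bLoop_none_nf hf,
            ih q.length hqn q (some p) le_rfl (by intro b hb'; cases hb'; exact hf)]
          rfl
        | some j =>
          have hj2 : j + 2 ≤ p.length := findDD_bound hf
          have hdropfree : hasDD (p.drop (j + 2) ++ ['(']) = false := by
            have h3 : p.drop (j + 2) ++ ['('] = (p ++ ['(']).drop (j + 2) := by
              rw [List.drop_append_of_le_length (by omega)]
            rw [h3]; exact hasDD_drop (j + 2) hp
          have hDs : findDD (p ++ '(' :: '(' :: q) = some j := findDD_append_left _ hf
          rw [bLoop_none_f hf, ih q.length hqn q none le_rfl (by intro b hb'; cases hb'),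
            aLoop_open_some hDs, List.take_append_of_le_length (by omega),
            List.drop_append_of_le_length (by omega), aLoop_copy q hdropfree]
          rfl
      | some b =>
        have hb := hbuf b rfl
        show bLoop (p :: splitDD q) (some b) =
          aLoop ('(' :: '(' :: (b ++ '(' :: '(' :: (p ++ '(' :: '(' :: q)))
        cases hf : findDD p with
        | none =>
          have hcur : findDD (b ++ '(' :: '(' :: p) = none := by
            rw [findDD_buf b p hb, hf]; rfl
          rw [bLoop_some_nf hb hf,
            ih q.length hqn q (some (b ++ '(' :: '(' :: p)) le_rfl
              (by intro b' hb'; cases hb'; exact hcur)]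
          show aLoop ('(' :: '(' :: ((b ++ '(' :: '(' :: p) ++ '(' :: '(' :: q)) = _
          rw [List.append_assoc]
          rfl
        | some j =>
          have hj2 : j + 2 ≤ p.length := findDD_bound hf
          have hdropfree : hasDD (p.drop (j + 2) ++ ['(']) = false := by
            have h3 : p.drop (j + 2) ++ ['('] = (p ++ ['(']).drop (j + 2) := by
              rw [List.drop_append_of_le_length (by omega)]
            rw [h3]; exact hasDD_drop (j + 2) hp
          have hDs : findDD (p ++ '(' :: '(' :: q) = some j := findDD_append_left _ hf
          have hD : findDD (b ++ '(' :: '(' :: (p ++ '(' :: '(' :: q)) =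
              some (b.length + 2 + j) := by
            rw [findDD_buf b _ hb, hDs]; rfl
          rw [bLoop_some_f hb hf, ih q.length hqn q none le_rfl (by intro b' hb'; cases hb'),
            aLoop_open_some hD, take_buf,
            show b.length + 2 + j + 2 = b.length + 2 + (j + 2) by omega, drop_buf,
            List.take_append_of_le_length (by omega),
            List.drop_append_of_le_length (by omega), aLoop_copy q hdropfree]
          rfl

lemma main_list (l : List Char) :
    aLoop l = (match splitDD l with | [] => [] | p :: ps => p ++ bLoop ps none) := by
  rcases splitDD_decompose l with ⟨hno, hsp⟩ | ⟨p, q, hs, hp, hsp, _⟩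
  · rw [hsp]; simp [bLoop, aLoop_id hno]
  · rw [hsp]
    show aLoop l = p ++ bLoop (splitDD q) none
    rw [bLoop_eq_aLoop q.length q none le_rfl (by intro b hb; cases hb)]
    rw [hs, aLoop_copy q hp]
    rfl

-- ===== VERDICT (by name: the statement is the Claim_ definition above) =====
theorem manual_double_parens_replace_spec : Claim_equal_manual_double_parens_replace := by
  intro s _
  show manual_double_parens_replace s = manual_double_parens_replace_alt s
  unfold manual_double_parens_replace manual_double_parens_replace_alt
  rw [main_list]
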